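-- pv_equiv track=rewrite | github.com/BrianLusina/PythonSnips | pysnips/hashes/lists/missing_array/length_of_missing_array.py | get_length_of_missing_array
-- ===== SOURCE A (Python) =====
-- def get_length_of_missing_array(array_of_arrays):
--     """
--     Sort the list in ascending order and extract the lengths of each list into another list
--     Loop through the list of lengths searching to the greatest distance between 2 elements
--     if the distance is greater than 1, add 1 to the previous element (or subtract 1 from next element)
--     return the sum of this operation
--     :param array_of_arrays:
--     :return: The length of the missing array
--     """
--     indx, m = 0, 0
--
--     if array_of_arrays is None or [] in array_of_arrays:
--         return 0
--     if None in array_of_arrays: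
--         return 0
--
--     len_list = [len(lst) for lst in sorted(array_of_arrays, key=len)]
--
--     while indx <= len(len_list):
--         try:
--             if (len_list[indx + 1] - len_list[indx]) > 1:
--                 m = len_list[indx + 1] - 1
--             indx += 1
--         except IndexError:
--             break
--     return m
-- ===== SOURCE B (Python) =====
-- def get_length_of_missing_array(array_of_arrays):
--     if array_of_arrays is None or [] in array_of_arrays or None in array_of_arrays:
--         return 0
--     lengths = set(len(lst) for lst in array_of_arrays)
--     if len(lengths) < 2:
--         return 0
--     missing = set(range(min(lengths), max(lengths) + 1)) - lengths
--     return max(missing) if missing else 0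
-- ===== Notes on version B (the rewrite author's own statement) =====
-- stated objective: alternative
-- what changed: A sorts the sublists, extracts lengths and scans adjacent pairs keeping the last gap's upper bound minus one; B builds the set of present lengths, forms the complete integer range min..max, subtracts the present set and returns the maximum missing length (no sort, no pair scan).
import Mathlib
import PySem

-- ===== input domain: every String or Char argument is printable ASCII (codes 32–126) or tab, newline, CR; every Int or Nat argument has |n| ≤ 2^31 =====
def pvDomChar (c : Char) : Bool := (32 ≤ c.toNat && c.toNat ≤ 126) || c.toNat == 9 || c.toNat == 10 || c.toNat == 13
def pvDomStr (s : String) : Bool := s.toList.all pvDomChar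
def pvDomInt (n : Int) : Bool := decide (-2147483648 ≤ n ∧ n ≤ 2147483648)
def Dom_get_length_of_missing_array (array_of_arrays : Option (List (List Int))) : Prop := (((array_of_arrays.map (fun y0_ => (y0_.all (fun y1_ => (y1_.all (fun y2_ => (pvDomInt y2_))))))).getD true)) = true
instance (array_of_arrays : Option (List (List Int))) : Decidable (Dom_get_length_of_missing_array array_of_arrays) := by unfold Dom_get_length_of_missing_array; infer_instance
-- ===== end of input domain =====

-- B replaces A's sort-and-scan-for-the-last-gap with "build the full expected range of
-- lengths, subtract the present lengths as a set, take the maximum of what is missing"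
-- (objective: alternative algorithm; not claimed faster).

-- ===== PORT A =====
-- the while/try loop of A: indx steps forward while `indx <= len(len_list)`;
-- the two subscripts len_list[indx+1], len_list[indx] raise IndexError (none) → break
def pvALoop (len_list : List Int) (indx : Nat) (m : Int) : Int :=
  if _h : indx ≤ len_list.length then
    match PySem.List.pyGet? len_list ((indx : Int) + 1), PySem.List.pyGet? len_list (indx : Int) with
    | some x, some y => pvALoop len_list (indx + 1) (if x - y > 1 then x - 1 else m)
    | _, _ => m
  else m
termination_by len_list.length + 1 - indx
decreasing_by omega

def get_length_of_missing_array (array_of_arrays : Option (List (List Int))) : Int :=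
  match array_of_arrays with
  | none => 0
  | some arr =>
    if ([] : List Int) ∈ arr then 0
    else
      -- `None in array_of_arrays` can never hold under the type List (List Int); the branch is a no-op
      let len_list := (PySem.List.sorted arr (fun l => (l.length : Int)) false).map (fun l => (l.length : Int))
      pvALoop len_list 0 0

-- ===== PORT B =====
def get_length_of_missing_array_alt (array_of_arrays : Option (List (List Int))) : Int :=
  match array_of_arrays with
  | none => 0
  | some arr =>
    if ([] : List Int) ∈ arr then 0
    else
      let lengths : PySem.Set Int := PySem.Set.ofList (arr.map (fun l => (l.length : Int)))
      if PySem.Set.len lengths < 2 then 0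
      else
        -- min/max are guarded nonempty by `len(lengths) < 2`; `.getD 0` is unreachable
        let mn := (PySem.List.min? lengths (fun x => x)).getD 0
        let mx := (PySem.List.max? lengths (fun x => x)).getD 0
        let missing : PySem.Set Int :=
          PySem.Set.diff (PySem.Set.ofList (PySem.List.pyRange mn (mx + 1) 1)) lengths
        if missing.isEmpty then 0 else (PySem.List.max? missing (fun x => x)).getD 0

-- ===== PRECONDITION & SPEC =====
def Spec_get_length_of_missing_array (array_of_arrays : Option (List (List Int))) (out : Int) : Prop := out = get_length_of_missing_array_alt array_of_arrays
instance (array_of_arrays : Option (List (List Int))) (out : Int) : Decidable (Spec_get_length_of_missing_array array_of_arrays out) := by unfold Spec_get_length_of_missing_array; infer_instance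

-- ===== CLAIM (what is proved, stated in full; the proofs are below) =====
def Claim_equal_get_length_of_missing_array : Prop := ∀ (array_of_arrays : Option (List (List Int))), Dom_get_length_of_missing_array array_of_arrays → Spec_get_length_of_missing_array array_of_arrays (get_length_of_missing_array array_of_arrays)

-- ===== LEMMAS AND PROOFS =====

-- proof-side characterisation of A's scan: the value of the LAST adjacent gap, if any
def pvG : List Int → Option Int
  | [] => none
  | [_] => none
  | x :: y :: t => (pvG (y :: t)).orElse (fun _ => if y - x > 1 then some (y - 1) else none)

theorem pvALoop_eq_g (len_list : List Int) (indx : Nat) (m : Int) :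
    pvALoop len_list indx m = (pvG (len_list.drop indx)).getD m := by
  fun_induction pvALoop len_list indx m
  case case1 indx m h x y hy hx ih =>
    have hcast : (indx : Int) + 1 = ((indx + 1 : Nat) : Int) := by push_cast; ring
    rw [hcast, PySem.List.pyGet?_natCast] at hx
    rw [PySem.List.pyGet?_natCast] at hy
    have hi1 : indx + 1 < len_list.length := (List.getElem?_eq_some_iff.mp hx).1
    have hi0 : indx < len_list.length := by omega
    have hgx : len_list[indx + 1] = x := by
      have := (List.getElem?_eq_some_iff.mp hx).2; simpa using this
    have hgy : len_list[indx] = y := by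
      have := (List.getElem?_eq_some_iff.mp hy).2; simpa using this
    have hd1 : List.drop indx len_list = y :: List.drop (indx + 1) len_list := by
      rw [List.drop_eq_getElem_cons hi0, hgy]
    have hd2 : List.drop (indx + 1) len_list = x :: List.drop (indx + 2) len_list := by
      rw [List.drop_eq_getElem_cons hi1, hgx]
    simp only [dite_eq_ite] at ih
    rw [ih]
    rw [hd1, hd2, pvG, ← hd2]
    cases hg : pvG (List.drop (indx + 1) len_list) with
    | some w => simp [Option.orElse]
    | none => by_cases hgap : x - y > 1 <;> simp [Option.orElse, hgap]
  case case2 indx m h hnone =>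
    have hlen : len_list.length ≤ indx + 1 := by
      by_contra hlt
      have hi1 : indx + 1 < len_list.length := by omega
      have hi0 : indx < len_list.length := by omega
      exact hnone len_list[indx + 1] len_list[indx]
        (by rw [show (indx : Int) + 1 = ((indx + 1 : Nat) : Int) by push_cast; ring,
              PySem.List.pyGet?_natCast]; simp [hi1])
        (by rw [PySem.List.pyGet?_natCast]; simp [hi0])
    match hdl : List.drop indx len_list with
    | [] => simp [pvG]
    | [a] => simp [pvG]
    | a :: b :: t =>
      exfalso
      have := congrArg List.length hdl
      simp [List.length_drop] at this
      omega
  case case3 indx m h =>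
    have : List.drop indx len_list = [] := List.drop_eq_nil_of_le (by omega)
    simp [this, pvG]


theorem pvG_none (L : List Int) (hs : L.Pairwise (· ≤ ·)) (h : pvG L = none) :
    ∀ k : Int, (∃ a ∈ L, a ≤ k) → (∃ b ∈ L, k ≤ b) → k ∈ L := by
  match L with
  | [] => rintro k ⟨a, ha, -⟩ -; simp at ha
  | [x] =>
    rintro k ⟨a, ha, hak⟩ ⟨b, hb, hkb⟩
    simp at ha hb
    have : k = x := by omega
    simp [this]
  | x :: y :: t =>
    rw [List.pairwise_cons] at hs
    obtain ⟨hxall, hs'⟩ := hs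
    have hyall : ∀ b ∈ t, y ≤ b := (List.pairwise_cons.mp hs').1
    cases hyt : pvG (y :: t) with
    | some w => simp [pvG, hyt, Option.orElse] at h
    | none =>
      have hxy : x ≤ y := hxall y (by simp)
      have hgap : ¬ y - x > 1 := by
        by_contra hg
        simp [pvG, hyt, Option.orElse, hg] at h
      have ih := pvG_none (y :: t) hs' hyt
      rintro k ⟨a, ha, hak⟩ ⟨b, hb, hkb⟩
      by_cases hky : y ≤ k
      · rcases List.mem_cons.mp hb with hbx | hb'
        · have : k = x := by omega
          simp [this]
        · have : k ∈ y :: t := ih k ⟨y, by simp, hky⟩ ⟨b, hb', hkb⟩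
          simp [List.mem_cons] at this ⊢; tauto
      · rcases List.mem_cons.mp ha with hax | ha'
        · have : k = x := by omega
          simp [this]
        · exfalso
          have hya : y ≤ a := by
            rcases List.mem_cons.mp ha' with h1 | h2
            · omega
            · exact hyall a h2
          omega

theorem pvG_some (L : List Int) (hs : L.Pairwise (· ≤ ·)) (v : Int) (h : pvG L = some v) :
    (∃ a ∈ L, a < v) ∧ (∃ b ∈ L, v < b) ∧ v ∉ L ∧
      (∀ k : Int, v < k → (∃ b ∈ L, k ≤ b) → k ∈ L) := by
  match L with
  | [] => simp [pvG] at h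
  | [x] => simp [pvG] at h
  | x :: y :: t =>
    rw [List.pairwise_cons] at hs
    obtain ⟨hxall, hs'⟩ := hs
    have hyall : ∀ b ∈ t, y ≤ b := (List.pairwise_cons.mp hs').1
    have hxy : x ≤ y := hxall y (by simp)
    cases hyt : pvG (y :: t) with
    | some w =>
      have hwv : w = v := by simpa [pvG, hyt, Option.orElse] using h
      subst hwv
      obtain ⟨⟨a, ha, hav⟩, ⟨b, hb, hvb⟩, hnm, hcov⟩ := pvG_some (y :: t) hs' w hyt
      have hya : y ≤ a := by
        rcases List.mem_cons.mp ha with h1 | h2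
        · omega
        · exact hyall a h2
      refine ⟨⟨a, by simp only [List.mem_cons] at ha ⊢; tauto, hav⟩, ⟨b, by simp only [List.mem_cons] at hb ⊢; tauto, hvb⟩, ?_, ?_⟩
      · intro hv
        rcases List.mem_cons.mp hv with h1 | h2
        · omega
        · exact hnm h2
      · rintro k hvk ⟨c, hc, hkc⟩
        rcases List.mem_cons.mp hc with h1 | h2
        · omega
        · have : k ∈ y :: t := hcov k hvk ⟨c, h2, hkc⟩
          simp [List.mem_cons] at this ⊢; tauto
    | none =>
      have hgap : y - x > 1 ∧ y - 1 = v := by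
        by_cases hg : y - x > 1
        · refine ⟨hg, ?_⟩
          simpa [pvG, hyt, Option.orElse, hg] using h
        · simp [pvG, hyt, Option.orElse, hg] at h
      obtain ⟨hg, hv⟩ := hgap
      have hcov' := pvG_none (y :: t) hs' hyt
      refine ⟨⟨x, by simp, by omega⟩, ⟨y, by simp, by omega⟩, ?_, ?_⟩
      · intro hv'
        rcases List.mem_cons.mp hv' with h1 | h2
        · omega
        · have hya : y ≤ v := by
            rcases List.mem_cons.mp h2 with h3 | h4
            · omega
            · exact hyall v h4
          omega
      · rintro k hvk ⟨c, hc, hkc⟩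
        rcases List.mem_cons.mp hc with h1 | h2
        · omega
        · have : k ∈ y :: t := hcov' k ⟨y, by simp, by omega⟩ ⟨c, h2, hkc⟩
          simp [List.mem_cons] at this ⊢; tauto

theorem pvG_const (L : List Int) (h : ∀ a ∈ L, ∀ b ∈ L, a = b) : pvG L = none := by
  match L with
  | [] => rfl
  | [_] => rfl
  | x :: y :: t =>
    have hxy : x = y := h x (by simp) y (by simp)
    have ih := pvG_const (y :: t) (fun a ha b hb => h a (by simp_all) b (by simp_all))
    simp [pvG, ih, Option.orElse]
    omega

-- ===== VERDICT (by name: the statement is the Claim_ definition above) =====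
theorem get_length_of_missing_array_spec : Claim_equal_get_length_of_missing_array := by
  intro arr _hdom
  unfold Spec_get_length_of_missing_array
  match arr with
  | none => rfl
  | some arr =>
    simp only [get_length_of_missing_array, get_length_of_missing_array_alt]
    by_cases hnil : ([] : List Int) ∈ arr
    · simp [hnil]
    · simp only [hnil, if_neg, not_false_iff]
      set key : List Int → Int := fun l => (l.length : Int) with hkey
      set L : List Int := (PySem.List.sorted arr key false).map key with hL
      set lens : List Int := arr.map key with hlens
      set S : PySem.Set Int := PySem.Set.ofList lens with hSdef
      have hperm : L.Perm lens := List.Perm.map key (PySem.List.sorted_perm arr key false)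
      have hmemL : ∀ k : Int, k ∈ L ↔ k ∈ lens := fun k => hperm.mem_iff
      have hpair : L.Pairwise (· ≤ ·) := PySem.List.sorted_map_key_pairwise arr key
      have hmemS : ∀ k : Int, k ∈ S ↔ k ∈ L := by
        intro k; rw [hSdef, PySem.Set.mem_ofList, ← hmemL]
      have hA : pvALoop L 0 0 = (pvG L).getD 0 := by
        simpa using pvALoop_eq_g L 0 0
      rw [hA]
      by_cases hlen2 : PySem.Set.len S < 2
      · rw [if_pos hlen2]
        have hone : ∀ a ∈ S, ∀ b ∈ S, a = b := by
          match hSc : S with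
          | [] => intro a ha; simp at ha
          | [s] => intro a ha b hb; simp at ha hb; omega
          | s :: s' :: t =>
            exfalso
            simp [PySem.Set.len] at hlen2
            omega
        have : pvG L = none := by
          apply pvG_const
          intro a ha b hb
          exact hone a ((hmemS a).mpr ha) b ((hmemS b).mpr hb)
        simp [this]
      · rw [if_neg hlen2]
        have hSne : S ≠ [] := by
          intro hn; rw [hn] at hlen2; simp [PySem.Set.len] at hlen2
        obtain ⟨mn, hmn⟩ : ∃ mn, PySem.List.min? S (fun x => x) = some mn := by
          cases hc : PySem.List.min? S (fun x => x) with
          | none => exact absurd ((PySem.List.min?_eq_none_iff S _).mp hc) hSne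
          | some mn => exact ⟨mn, rfl⟩
        obtain ⟨mx, hmx⟩ : ∃ mx, PySem.List.max? S (fun x => x) = some mx := by
          cases hc : PySem.List.max? S (fun x => x) with
          | none => exact absurd ((PySem.List.max?_eq_none_iff S _).mp hc) hSne
          | some mx => exact ⟨mx, rfl⟩
        rw [hmn, hmx]
        simp only [Option.getD_some]
        have hmnS : mn ∈ S := PySem.List.min?_mem hmn
        have hmxS : mx ∈ S := PySem.List.max?_mem hmx
        have hmnMin : ∀ y ∈ S, mn ≤ y := PySem.List.min?_isMin hmn
        have hmxMax : ∀ y ∈ S, y ≤ mx := PySem.List.max?_isMax hmx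
        have hmemMiss : ∀ k : Int,
            k ∈ PySem.Set.diff (PySem.Set.ofList (PySem.List.pyRange mn (mx + 1) 1)) S ↔
              (mn ≤ k ∧ k ≤ mx ∧ k ∉ L) := by
          intro k
          rw [PySem.Set.mem_diff, PySem.Set.mem_ofList, PySem.List.mem_pyRange_one, hmemS]
          constructor
          · rintro ⟨⟨h1, h2⟩, h3⟩; exact ⟨h1, by omega, h3⟩
          · rintro ⟨h1, h2, h3⟩; exact ⟨⟨h1, by omega⟩, h3⟩
        cases hg : pvG L with
        | none =>
          have hcov := pvG_none L hpair hg
          have hempty : PySem.Set.diff (PySem.Set.ofList (PySem.List.pyRange mn (mx + 1) 1)) S = [] := by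
            apply List.eq_nil_iff_forall_not_mem.mpr
            intro k hk
            obtain ⟨h1, h2, h3⟩ := (hmemMiss k).mp hk
            exact h3 (hcov k ⟨mn, (hmemS mn).mp hmnS, h1⟩ ⟨mx, (hmemS mx).mp hmxS, h2⟩)
          simp [hempty]
        | some v =>
          obtain ⟨⟨a, ha, hav⟩, ⟨b, hb, hvb⟩, hnm, hcov⟩ := pvG_some L hpair v hg
          have hvmiss : v ∈ PySem.Set.diff (PySem.Set.ofList (PySem.List.pyRange mn (mx + 1) 1)) S := by
            apply (hmemMiss v).mpr
            refine ⟨?_, ?_, hnm⟩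
            · have := hmnMin a ((hmemS a).mpr ha); omega
            · have := hmxMax b ((hmemS b).mpr hb); omega
          have hne : ¬ (PySem.Set.diff (PySem.Set.ofList (PySem.List.pyRange mn (mx + 1) 1)) S).isEmpty := by
            cases hc : PySem.Set.diff (PySem.Set.ofList (PySem.List.pyRange mn (mx + 1) 1)) S with
            | nil => rw [hc] at hvmiss; simp at hvmiss
            | cons c t => simp
          rw [if_neg hne]
          obtain ⟨w, hw⟩ : ∃ w, PySem.List.max? (PySem.Set.diff (PySem.Set.ofList (PySem.List.pyRange mn (mx + 1) 1)) S) (fun x => x) = some w := by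
            cases hc : PySem.List.max? (PySem.Set.diff (PySem.Set.ofList (PySem.List.pyRange mn (mx + 1) 1)) S) (fun x => x) with
            | none =>
              rw [(PySem.List.max?_eq_none_iff _ _).mp hc] at hvmiss
              simp at hvmiss
            | some w => exact ⟨w, rfl⟩
          rw [hw]
          simp only [Option.getD_some]
          have hvw : v ≤ w := PySem.List.max?_isMax hw v hvmiss
          have hwmiss := PySem.List.max?_mem hw
          obtain ⟨hw1, hw2, hw3⟩ := (hmemMiss w).mp hwmiss
          have hwv : w ≤ v := by
            by_contra hlt
            exact hw3 (hcov w (by omega) ⟨mx, (hmemS mx).mp hmxS, hw2⟩)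
          omega
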